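-- pv_equiv track=rewrite | github.com/zsquaredz/adapt_vs_finetune | code/run_BART_adapters.py | convert
-- ===== SOURCE A (Python) =====
-- def convert(inputs, convert_dict):
--     counter = 1
--     convert_list = []
--     for summary in inputs:
--         summary = summary.strip()
--         summary_converted = []
--         for token in summary.split():
--             if token in convert_dict:
--                 summary_converted.append(convert_dict[token])
--             else:
--                 convert_dict[token] = str(counter)
--                 summary_converted.append(convert_dict[token])
--             counter += 1
--         convert_list.append(' '.join(summary_converted))
--     return convert_list
-- ===== SOURCE B (Python) =====
-- def convert(inputs, convert_dict):
--     # pass 1: assign ids (counter advances on every token, new or repeated)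
--     counter = 1
--     for summary in inputs:
--         for token in summary.strip().split():
--             if token not in convert_dict:
--                 convert_dict[token] = str(counter)
--             counter += 1
--     # pass 2: rebuild each summary through the fully built table
--     return [' '.join(convert_dict[t] for t in s.strip().split()) for s in inputs]
-- ===== Notes on version B (the rewrite author's own statement) =====
-- stated objective: alternative
-- what changed: B separates id assignment from output construction: a first pass builds the full token-id table (counter advancing on every token), then a second pass maps each summary through the finished table, instead of A's single fused pass that emits while inserting.
import Mathlib
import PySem

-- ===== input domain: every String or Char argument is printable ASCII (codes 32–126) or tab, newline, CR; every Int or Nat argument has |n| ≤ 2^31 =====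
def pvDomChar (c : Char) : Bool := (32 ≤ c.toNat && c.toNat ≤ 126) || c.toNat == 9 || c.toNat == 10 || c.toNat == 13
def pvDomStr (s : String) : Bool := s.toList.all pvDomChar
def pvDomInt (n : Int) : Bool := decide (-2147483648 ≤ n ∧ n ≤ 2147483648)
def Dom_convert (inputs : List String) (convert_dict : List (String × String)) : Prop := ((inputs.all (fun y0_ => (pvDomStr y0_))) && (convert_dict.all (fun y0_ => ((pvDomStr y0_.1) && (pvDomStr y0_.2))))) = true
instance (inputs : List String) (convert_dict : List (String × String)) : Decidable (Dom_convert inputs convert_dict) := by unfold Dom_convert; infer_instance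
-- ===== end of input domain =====

-- B replaces A's fused assign-while-emitting loop by two separate passes (build the
-- id table first, then rebuild the strings); return values agree everywhere.
-- Both Pythons mutate convert_dict identically; the theorems are about the return value.

-- ===== PORT A =====
-- tokens of a summary: summary.strip().split()
def pvTokens (s : String) : List String := PySem.Str.split₀ (PySem.Str.strip s)

-- inner loop of A over the tokens of one summary: state (dict, counter), emits ids
def convInner (d : PySem.Dict String String) (c : Int) :
    List String → List String × PySem.Dict String String × Int
  | [] => ([], d, c)
  | t :: rest =>
      if d.contains t then
        let r := convInner d (c + 1) rest
        (d.getD t "" :: r.1, r.2)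
      else
        let d1 := d.insert t (PySem.Int.toStr c)
        let r := convInner d1 (c + 1) rest
        (d1.getD t "" :: r.1, r.2)

-- outer loop of A over the summaries
def convOuter (d : PySem.Dict String String) (c : Int) :
    List String → List String × PySem.Dict String String × Int
  | [] => ([], d, c)
  | s :: rest =>
      let r := convInner d c (pvTokens s)
      let r2 := convOuter r.2.1 r.2.2 rest
      (PySem.Str.join " " r.1 :: r2.1, r2.2)

def convert (inputs : List String) (convert_dict : List (String × String)) : List String :=
  (convOuter (PySem.Dict.ofList convert_dict) 1 inputs).1

-- ===== PORT B =====
-- pass 1, per token: assign an id to an unseen token; counter advances always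
def buildTok (d : PySem.Dict String String) (c : Int) :
    List String → PySem.Dict String String × Int
  | [] => (d, c)
  | t :: rest =>
      buildTok (if d.contains t then d else d.insert t (PySem.Int.toStr c)) (c + 1) rest

-- pass 1, over all summaries
def buildAll (d : PySem.Dict String String) (c : Int) :
    List String → PySem.Dict String String × Int
  | [] => (d, c)
  | s :: rest =>
      let r := buildTok d c (pvTokens s)
      buildAll r.1 r.2 rest

def convert_alt (inputs : List String) (convert_dict : List (String × String)) : List String :=
  let final := buildAll (PySem.Dict.ofList convert_dict) 1 inputs
  inputs.map (fun s => PySem.Str.join " " ((pvTokens s).map (fun t => final.1.getD t "")))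

-- ===== PRECONDITION & SPEC =====
def Spec_convert (inputs : List String) (convert_dict : List (String × String)) (out : List String) : Prop := out = convert_alt inputs convert_dict
instance (inputs : List String) (convert_dict : List (String × String)) (out : List String) : Decidable (Spec_convert inputs convert_dict out) := by unfold Spec_convert; infer_instance

-- ===== CLAIM (what is proved, stated in full; the proofs are below) =====
def Claim_equal_convert : Prop := ∀ (inputs : List String) (convert_dict : List (String × String)), Dom_convert inputs convert_dict → Spec_convert inputs convert_dict (convert inputs convert_dict)

-- ===== LEMMAS AND PROOFS =====

-- "D' extends D": every binding of D is still in D'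
def pvExt (D D' : PySem.Dict String String) : Prop :=
  ∀ k v, D.get? k = some v → D'.get? k = some v

theorem pvExt_refl (D : PySem.Dict String String) : pvExt D D := fun _ _ h => h

theorem pvExt_trans {D1 D2 D3 : PySem.Dict String String}
    (h1 : pvExt D1 D2) (h2 : pvExt D2 D3) : pvExt D1 D3 :=
  fun k v h => h2 k v (h1 k v h)

theorem pvExt_insert_fresh (D : PySem.Dict String String) (t w : String)
    (h : D.contains t = false) : pvExt D (D.insert t w) := by
  intro k v hk
  rw [PySem.Dict.get?_insert]
  split
  · next heq =>
    subst heq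
    rw [PySem.Dict.contains_eq_isSome_get?, hk] at h
    simp at h
  · exact hk

theorem pvExt_buildTok (d : PySem.Dict String String) (c : Int) (ts : List String) :
    pvExt d (buildTok d c ts).1 := by
  induction ts generalizing d c with
  | nil => exact pvExt_refl d
  | cons t rest ih =>
    simp only [buildTok]
    by_cases h : d.contains t = true
    · simpa [h] using ih d (c + 1)
    · have h' : d.contains t = false := by simpa using h
      simp only [h', if_neg, Bool.false_eq_true, not_false_eq_true]
      exact pvExt_trans (pvExt_insert_fresh d t _ h')
        (ih (d.insert t (PySem.Int.toStr c)) (c + 1))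

theorem pvExt_buildAll (d : PySem.Dict String String) (c : Int) (ss : List String) :
    pvExt d (buildAll d c ss).1 := by
  induction ss generalizing d c with
  | nil => exact pvExt_refl d
  | cons s rest ih =>
    simp only [buildAll]
    exact pvExt_trans (pvExt_buildTok d c (pvTokens s))
      (ih (buildTok d c (pvTokens s)).1 (buildTok d c (pvTokens s)).2)

-- A's inner loop carries the same (dict, counter) state as B's pass-1 token loop
theorem convInner_state (d : PySem.Dict String String) (c : Int) (ts : List String) :
    (convInner d c ts).2 = buildTok d c ts := by
  induction ts generalizing d c with
  | nil => rfl
  | cons t rest ih =>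
    simp only [convInner, buildTok]
    by_cases h : d.contains t = true
    · simp [h, ih]
    · have h' : d.contains t = false := by simpa using h
      simp [h', ih]

-- A's inner loop output, read through any dict extending its final state
theorem convInner_out (d Df : PySem.Dict String String) (c : Int) (ts : List String)
    (hext : pvExt (buildTok d c ts).1 Df) :
    (convInner d c ts).1 = ts.map (fun t => Df.getD t "") := by
  induction ts generalizing d c with
  | nil => rfl
  | cons t rest ih =>
    simp only [convInner, buildTok] at *
    by_cases h : d.contains t = true
    · rw [PySem.Dict.contains_eq_isSome_get?] at h
      obtain ⟨v, hv⟩ := Option.isSome_iff_exists.mp h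
      have hext' : pvExt (buildTok d (c + 1) rest).1 Df := by
        simpa [PySem.Dict.contains_eq_isSome_get?, hv] using hext
      have hD : Df.get? t = some v :=
        hext' t v (pvExt_buildTok d (c + 1) rest t v hv)
      simp only [PySem.Dict.contains_eq_isSome_get?, hv, Option.isSome_some, if_pos,
        List.map_cons]
      rw [ih d (c + 1) hext']
      simp [PySem.Dict.getD_eq_get?_getD, hv, hD]
    · have h' : d.contains t = false := by simpa using h
      have hext' : pvExt (buildTok (d.insert t (PySem.Int.toStr c)) (c + 1) rest).1 Df := by
        simpa [h'] using hext
      have hv : (d.insert t (PySem.Int.toStr c)).get? t = some (PySem.Int.toStr c) :=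
        PySem.Dict.get?_insert_self _ _ _
      have hD : Df.get? t = some (PySem.Int.toStr c) :=
        hext' t _ (pvExt_buildTok (d.insert t (PySem.Int.toStr c)) (c + 1) rest t _ hv)
      simp only [h', List.map_cons, Bool.false_eq_true, if_neg, not_false_eq_true]
      rw [ih (d.insert t (PySem.Int.toStr c)) (c + 1) hext']
      simp [PySem.Dict.getD_eq_get?_getD, hv, hD]

-- A's outer loop, read through any dict extending its final state
theorem convOuter_out (d Df : PySem.Dict String String) (c : Int) (ss : List String)
    (hext : pvExt (buildAll d c ss).1 Df) :
    (convOuter d c ss).1 =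
      ss.map (fun s => PySem.Str.join " " ((pvTokens s).map (fun t => Df.getD t ""))) := by
  induction ss generalizing d c with
  | nil => rfl
  | cons s rest ih =>
    simp only [convOuter, buildAll, List.map_cons] at *
    rw [convInner_state d c (pvTokens s)]
    have hTokExt : pvExt (buildTok d c (pvTokens s)).1 Df :=
      pvExt_trans (pvExt_buildAll (buildTok d c (pvTokens s)).1
        (buildTok d c (pvTokens s)).2 rest) hext
    rw [convInner_out d Df c (pvTokens s) hTokExt]
    rw [ih (buildTok d c (pvTokens s)).1 (buildTok d c (pvTokens s)).2 hext]

-- ===== VERDICT (by name: the statement is the Claim_ definition above) =====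
theorem convert_spec : Claim_equal_convert := by
  intro inputs convert_dict _
  unfold Spec_convert convert convert_alt
  exact convOuter_out _ _ 1 inputs (pvExt_refl _)
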